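-- pv_equiv track=rewrite | github.com/itsuitsuki/urnng_framed_tg | tg_model.py | generate_left_tree
-- ===== SOURCE A (Python) =====
-- def generate_left_tree(idx):
--     num = len(idx)
--     tree = ''
--     for i in range(num - 1):
--         tree += '( '
--     tree += '0 '
--     for i in range(1, num):
--         tree += str(i) + ' ) '
--     return tree
-- ===== SOURCE B (Python) =====
-- def generate_left_tree(idx):
--     # The output is a stack of wrap layers around the leaf '0 ': layer i
--     # contributes '( ' on the left and str(i) + ' ) ' on the right.  Build
--     # the combined (left, right) wrapper for layers [a, b) by balanced
--     # divide and conquer (outer half's left precedes inner half's left;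
--     # inner half's right precedes outer half's right), then close the hole
--     # with the leaf '0 '.
--     def layers(a, b):
--         if b - a == 1:
--             return '( ', str(a) + ' ) '
--         m = (a + b) // 2
--         l_in, r_in = layers(a, m)
--         l_out, r_out = layers(m, b)
--         return l_out + l_in, r_in + r_out
--     n = len(idx)
--     if n <= 1:
--         return '0 '
--     l, r = layers(1, n)
--     return l + '0 ' + r
-- ===== Notes on version B (the rewrite author's own statement) =====
-- stated objective: alternative
-- what changed: Replaces A's two staged append loops (count opening parens, then append numbered closings) with a balanced divide-and-conquer that builds the tree's (left, right) wrapper pair for layer ranges and closes it with the leaf '0 '.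
import Mathlib
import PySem

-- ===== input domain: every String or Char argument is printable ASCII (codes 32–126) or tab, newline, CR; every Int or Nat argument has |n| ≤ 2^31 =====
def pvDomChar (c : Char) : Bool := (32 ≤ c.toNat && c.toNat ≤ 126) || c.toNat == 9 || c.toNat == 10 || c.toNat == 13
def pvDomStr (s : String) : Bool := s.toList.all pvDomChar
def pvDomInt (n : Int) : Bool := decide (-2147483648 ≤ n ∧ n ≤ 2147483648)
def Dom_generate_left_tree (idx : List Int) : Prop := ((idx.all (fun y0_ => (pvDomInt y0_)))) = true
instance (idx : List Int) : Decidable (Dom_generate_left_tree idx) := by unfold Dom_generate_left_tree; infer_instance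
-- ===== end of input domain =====

-- B builds the (left, right) wrapper of the nested tree's layer stack by balanced divide and conquer
-- and closes it with the leaf '0 ', instead of A's two staged append loops; objective: alternative.


-- ===== PORT A =====
def generate_left_tree (idx : List Int) : String :=
  let num : Int := idx.length
  let tree : String := ""
  let tree := (PySem.List.pyRange 0 (num - 1) 1).foldl (fun t _ => t ++ "( ") tree
  let tree := tree ++ "0 "
  let tree := (PySem.List.pyRange 1 num 1).foldl (fun t i => t ++ PySem.Int.toStr i ++ " ) ") tree
  tree

-- ===== PORT B =====
-- Source B's 'layers(a, b)': combined (left, right) wrapper of layers [a, b), by balanced divide and conquer.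
-- The fuel argument is only a structural-termination guard; Source B's recursion always shrinks b - a,
-- so with fuel ≥ b - a the guard is never the branch taken.
def pvLayers : Nat → Int → Int → String × String
  | 0, a, _ => ("( ", PySem.Int.toStr a ++ " ) ")
  | fuel + 1, a, b =>
    if b - a == 1 then ("( ", PySem.Int.toStr a ++ " ) ")
    else
      let m := PySem.Int.floordiv (a + b) 2
      let li := pvLayers fuel a m
      let lo := pvLayers fuel m b
      (lo.1 ++ li.1, li.2 ++ lo.2)

def generate_left_tree_alt (idx : List Int) : String :=
  let n : Int := idx.length
  if n ≤ 1 then "0 "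
  else
    let lr := pvLayers n.toNat 1 n
    lr.1 ++ "0 " ++ lr.2

-- ===== PRECONDITION & SPEC =====
def Spec_generate_left_tree (idx : List Int) (out : String) : Prop := out = generate_left_tree_alt idx
instance (idx : List Int) (out : String) : Decidable (Spec_generate_left_tree idx out) := by unfold Spec_generate_left_tree; infer_instance

-- ===== CLAIM (what is proved, stated in full; the proofs are below) =====
def Claim_equal_generate_left_tree : Prop := ∀ (idx : List Int), Dom_generate_left_tree idx → Spec_generate_left_tree idx (generate_left_tree idx)

-- ===== LEMMAS AND PROOFS =====

-- proof-only helper: n copies of a string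
def pvStrTimes (s : String) : Nat → String
  | 0 => ""
  | k + 1 => s ++ pvStrTimes s k

theorem pvStrTimes_add (s : String) (p q : Nat) :
    pvStrTimes s (p + q) = pvStrTimes s p ++ pvStrTimes s q := by
  induction p with
  | zero => simp [pvStrTimes]
  | succ k ih => simp [pvStrTimes, Nat.succ_add, ih, String.append_assoc]

-- A's first loop appends one "( " per element of the range
theorem pvFold1 (l : List Int) (init : String) :
    l.foldl (fun t _ => t ++ "( ") init = init ++ pvStrTimes "( " l.length := by
  induction l generalizing init with
  | nil => simp [pvStrTimes]
  | cons a l ih =>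
    simp only [List.foldl_cons, List.length_cons]
    rw [ih (init ++ "( ")]
    simp [pvStrTimes, String.append_assoc]

-- an appending foldl factors out its initial accumulator
theorem pvFold2 (l : List Int) (init : String) :
    l.foldl (fun t i => t ++ PySem.Int.toStr i ++ " ) ") init
      = init ++ l.foldl (fun t i => t ++ PySem.Int.toStr i ++ " ) ") "" := by
  induction l generalizing init with
  | nil => simp
  | cons a l ih =>
    simp only [List.foldl_cons]
    rw [ih (init ++ PySem.Int.toStr a ++ " ) "), ih ("" ++ PySem.Int.toStr a ++ " ) ")]
    simp [String.append_assoc]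

-- B's divide and conquer computes exactly (n-1 opening parens, A's closing fold) on layers [a, b)
theorem pvLayersSpec (fuel : Nat) (a b : Int) (h1 : 1 ≤ b - a) (hf : (b - a).toNat ≤ fuel) :
    pvLayers fuel a b
      = (pvStrTimes "( " (b - a).toNat,
         (PySem.List.pyRange a b 1).foldl (fun t i => t ++ PySem.Int.toStr i ++ " ) ") "") := by
  induction fuel generalizing a b with
  | zero => omega
  | succ fuel ih =>
    by_cases hb : b - a = 1
    · have hb' : b = a + 1 := by omega
      subst hb'
      show pvLayers (fuel + 1) a (a + 1) = _
      rw [pvLayers]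
      simp [PySem.List.pyRange_one_singleton, pvStrTimes]
    · have h2 : 2 ≤ b - a := by omega
      have hm : PySem.Int.floordiv (a + b) 2 = (a + b) / 2 :=
        PySem.Int.floordiv_eq_ediv_of_pos (by omega)
      have hma : a < (a + b) / 2 := by omega
      have hmb : (a + b) / 2 < b := by omega
      show pvLayers (fuel + 1) a b = _
      rw [pvLayers]
      simp only [beq_iff_eq, if_neg hb, hm]
      rw [ih a ((a + b) / 2) (by omega) (by omega),
          ih ((a + b) / 2) b (by omega) (by omega)]
      have hsplit : PySem.List.pyRange a b 1
          = PySem.List.pyRange a ((a + b) / 2) 1 ++ PySem.List.pyRange ((a + b) / 2) b 1 :=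
        PySem.List.pyRange_one_append a ((a + b) / 2) b (by omega) (by omega)
      rw [hsplit, List.foldl_append]
      conv_rhs => rw [pvFold2]
      have htimes : (b - a).toNat = (b - (a + b) / 2).toNat + ((a + b) / 2 - a).toNat := by omega
      rw [htimes, pvStrTimes_add]

-- ===== VERDICT (by name: the statement is the Claim_ definition above) =====
theorem generate_left_tree_spec : Claim_equal_generate_left_tree := by
  intro idx _
  show generate_left_tree idx = generate_left_tree_alt idx
  show ((PySem.List.pyRange 0 ((idx.length : Int) - 1) 1).foldl (fun t _ => t ++ "( ") "" ++ "0 "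
        |> (PySem.List.pyRange 1 (idx.length : Int) 1).foldl (fun t i => t ++ PySem.Int.toStr i ++ " ) "))
      = generate_left_tree_alt idx
  unfold generate_left_tree_alt
  by_cases h : (idx.length : Int) ≤ 1
  · rw [if_pos h]
    rw [PySem.List.pyRange_one_eq_nil (by omega), PySem.List.pyRange_one_eq_nil (by omega)]
    simp
  · rw [if_neg h]
    rw [pvLayersSpec ((idx.length : Int)).toNat 1 (idx.length : Int) (by omega) (by omega)]
    rw [pvFold1, pvFold2, PySem.List.length_pyRange_one]
    simp [String.append_assoc]
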